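-- pv_equiv track=rewrite | github.com/miarolfe/SwEngGroup30 | back/life-insurance-back/services/riskCalculationService.py | calculateRiskScoreFromMedicalHistory
-- ===== SOURCE A (Python) =====
-- def calculateRiskScoreFromMedicalHistory(user : dict, diseaseDict) -> int:
--     riskScore : int = 0
--     healthConditions : list[str] = user["healthConditions"]
--     for healthProblem in healthConditions:
--         if healthProblem.casefold() == "cancer":
--             riskScore = 100
--             break
--         try:
--             score : int = diseaseDict[healthProblem.casefold()]
--             riskScore = riskScore + score
--         except KeyError:
--             # unknown disease -> increment score by 3
--             riskScore = riskScore + 3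
--     return riskScore
-- ===== SOURCE B (Python) =====
-- def calculateRiskScoreFromMedicalHistory(user: dict, diseaseDict) -> int:
--     healthConditions = user["healthConditions"]
--     if any(c.casefold() == "cancer" for c in healthConditions):
--         return 100
--     return sum(diseaseDict.get(c.casefold(), 3) for c in healthConditions)
-- ===== Notes on version B (the rewrite author's own statement) =====
-- stated objective: simpler
-- what changed: Replaced the accumulating loop with break/try-except by a short-circuiting any() probe for 'cancer' followed by a sum() over dict.get with default 3.
import Mathlib
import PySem

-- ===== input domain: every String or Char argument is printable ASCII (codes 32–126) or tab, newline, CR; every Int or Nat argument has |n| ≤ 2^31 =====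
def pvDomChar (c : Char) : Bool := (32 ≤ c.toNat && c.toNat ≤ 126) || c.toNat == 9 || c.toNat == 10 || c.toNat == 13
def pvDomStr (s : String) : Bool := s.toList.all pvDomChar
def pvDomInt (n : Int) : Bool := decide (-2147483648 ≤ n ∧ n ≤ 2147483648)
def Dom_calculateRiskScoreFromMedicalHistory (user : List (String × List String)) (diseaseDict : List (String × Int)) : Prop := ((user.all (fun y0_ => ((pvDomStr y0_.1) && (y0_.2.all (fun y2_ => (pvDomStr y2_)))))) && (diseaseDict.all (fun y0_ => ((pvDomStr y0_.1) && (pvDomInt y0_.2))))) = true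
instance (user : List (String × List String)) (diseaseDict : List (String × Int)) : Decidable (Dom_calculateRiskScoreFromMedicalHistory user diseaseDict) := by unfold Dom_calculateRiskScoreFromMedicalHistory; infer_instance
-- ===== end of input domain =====

-- B replaces A's accumulating loop with break/try-except by an any() probe for "cancer"
-- followed by a sum() aggregation with dict.get defaults (objective: simpler).
-- Python's str.casefold is ported as PySem.Str.lower, exact on the ASCII domain Dom_.

-- shared primitive: dict lookup (first match) on an association list
def pvAssocGet? {α : Type} (m : List (String × α)) (k : String) : Option α :=
  (m.find? (fun p => p.1 == k)).map (·.2)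

-- ===== PORT A =====
-- the for-loop with break and try/except, as structural recursion over (list, accumulator)
def pvRiskLoop (diseaseDict : List (String × Int)) : List String → Int → Int
  | [], riskScore => riskScore
  | healthProblem :: rest, riskScore =>
    if PySem.Str.lower healthProblem == "cancer" then 100
    else
      match pvAssocGet? diseaseDict (PySem.Str.lower healthProblem) with
      | some score => pvRiskLoop diseaseDict rest (riskScore + score)
      | none => pvRiskLoop diseaseDict rest (riskScore + 3)    -- KeyError branch

def calculateRiskScoreFromMedicalHistory (user : List (String × List String)) (diseaseDict : List (String × Int)) : Int :=
  let healthConditions := (pvAssocGet? user "healthConditions").getD []  -- Pre_ guarantees the key exists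
  pvRiskLoop diseaseDict healthConditions 0

-- ===== PORT B =====
def calculateRiskScoreFromMedicalHistory_alt (user : List (String × List String)) (diseaseDict : List (String × Int)) : Int :=
  let healthConditions := (pvAssocGet? user "healthConditions").getD []
  if healthConditions.any (fun c => PySem.Str.lower c == "cancer") then 100
  else (healthConditions.map (fun c => (pvAssocGet? diseaseDict (PySem.Str.lower c)).getD 3)).sum

-- ===== PRECONDITION & SPEC =====
-- Pre_: A raises KeyError unless the "healthConditions" key is present in user.
def Pre_calculateRiskScoreFromMedicalHistory (user : List (String × List String)) (diseaseDict : List (String × Int)) : Prop :=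
  (user.map Prod.fst).contains "healthConditions" = true
instance (user : List (String × List String)) (diseaseDict : List (String × Int)) : Decidable (Pre_calculateRiskScoreFromMedicalHistory user diseaseDict) := by unfold Pre_calculateRiskScoreFromMedicalHistory; infer_instance

def pvWitness_calculateRiskScoreFromMedicalHistory : (List (String × List String)) × (List (String × Int)) :=
  ([("healthConditions", ["flu", "asthma"])], [("flu", 5)])

def Spec_calculateRiskScoreFromMedicalHistory (user : List (String × List String)) (diseaseDict : List (String × Int)) (out : Int) : Prop := out = calculateRiskScoreFromMedicalHistory_alt user diseaseDict
instance (user : List (String × List String)) (diseaseDict : List (String × Int)) (out : Int) : Decidable (Spec_calculateRiskScoreFromMedicalHistory user diseaseDict out) := by unfold Spec_calculateRiskScoreFromMedicalHistory; infer_instance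

-- ===== CLAIM (what is proved, stated in full; the proofs are below) =====
def Claim_equal_calculateRiskScoreFromMedicalHistory : Prop := ∀ (user : List (String × List String)) (diseaseDict : List (String × Int)), Dom_calculateRiskScoreFromMedicalHistory user diseaseDict → Pre_calculateRiskScoreFromMedicalHistory user diseaseDict → Spec_calculateRiskScoreFromMedicalHistory user diseaseDict (calculateRiskScoreFromMedicalHistory user diseaseDict)

-- ===== LEMMAS AND PROOFS =====
-- loop characterisation: the break-loop equals "any cancer ⇒ 100, else acc + sum of per-condition scores"
theorem pvRiskLoop_eq (diseaseDict : List (String × Int)) (l : List String) :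
    ∀ acc : Int, pvRiskLoop diseaseDict l acc =
      if l.any (fun c => PySem.Str.lower c == "cancer") then 100
      else acc + (l.map (fun c => (pvAssocGet? diseaseDict (PySem.Str.lower c)).getD 3)).sum := by
  induction l with
  | nil => intro acc; simp [pvRiskLoop]
  | cons c rest ih =>
    intro acc
    by_cases hc : PySem.Str.lower c == "cancer"
    · simp [pvRiskLoop, hc]
    · have hc' : (PySem.Str.lower c == "cancer") = false := by simp_all
      cases hs : pvAssocGet? diseaseDict (PySem.Str.lower c) with
      | some s =>
        simp only [pvRiskLoop, hs, hc', Bool.false_eq_true, if_false, List.any_cons,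
          Bool.false_or, List.map_cons, List.sum_cons, Option.getD_some]
        rw [ih]; split <;> ring
      | none =>
        simp only [pvRiskLoop, hs, hc', Bool.false_eq_true, if_false, List.any_cons,
          Bool.false_or, List.map_cons, List.sum_cons, Option.getD_none]
        rw [ih]; split <;> ring

-- ===== VERDICT (by name: the statement is the Claim_ definition above) =====
theorem calculateRiskScoreFromMedicalHistory_spec : Claim_equal_calculateRiskScoreFromMedicalHistory := by
  intro user diseaseDict _ _
  unfold Spec_calculateRiskScoreFromMedicalHistory
  unfold calculateRiskScoreFromMedicalHistory calculateRiskScoreFromMedicalHistory_alt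
  rw [pvRiskLoop_eq]
  simp
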